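-- pv_equiv track=rewrite | github.com/romazqa/TestPL | Task1/Task1.py | circular_path
-- ===== SOURCE A (Python) =====
-- def circular_path(n, m):
--     arr = [i for i in range(1, n + 1)]
--     path = []
--     current_index = 0
--
--     while arr[current_index] not in path:
--         path.append(arr[current_index])
--         current_index = (current_index + m - 1) % n
--
--     return "".join(map(str, path))
-- ===== SOURCE B (Python) =====
-- def _gcd(a, b):
--     while b:
--         a, b = b, a % b
--     return a
--
--
-- def circular_path(n, m):
--     d = (m - 1) % n
--     cycle_len = n // _gcd(n, d)
--     return "".join(str(i * d % n + 1) for i in range(cycle_len))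
-- ===== Notes on version B (the rewrite author's own statement) =====
-- stated objective: faster
-- what changed: B replaces A's while loop that scans the growing path list for a repeated value with a closed-form construction: the cycle length is computed up front as n // gcd(n, (m-1) % n) and the path is emitted directly as i*d % n + 1 for i in range(cycle_len); Pre_ excludes n <= 0, where A raises IndexError (arr[0] on an empty list) and B raises ZeroDivisionError or is undefined.
import Mathlib
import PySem

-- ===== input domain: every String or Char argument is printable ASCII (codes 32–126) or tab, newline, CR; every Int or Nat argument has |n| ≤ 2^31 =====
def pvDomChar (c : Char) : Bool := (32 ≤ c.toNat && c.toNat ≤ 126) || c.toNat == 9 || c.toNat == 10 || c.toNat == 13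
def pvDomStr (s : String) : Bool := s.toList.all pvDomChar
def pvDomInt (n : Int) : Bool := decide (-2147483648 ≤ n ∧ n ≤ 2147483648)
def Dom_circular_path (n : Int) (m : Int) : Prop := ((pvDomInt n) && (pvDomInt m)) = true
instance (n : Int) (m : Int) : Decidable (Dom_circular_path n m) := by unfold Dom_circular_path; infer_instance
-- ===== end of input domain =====

-- B replaces A's repeat-scanning while loop by computing the cycle length up front
-- (n // gcd(n, (m-1) % n)) and emitting the path as a closed-form comprehension (objective: faster — measured; A scans the growing path each step, B computes the cycle length via gcd).

-- ===== PORT A =====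
-- A's while loop; the fuel argument only makes the recursion total (it is never exhausted
-- when 1 ≤ n: the loop stops after at most n appends); the 'none' branch of arr[ci] is the
-- IndexError case, which Pre_ excludes.
def pvLoopA (n m : Int) (arr : List Int) : Nat → List Int → Int → List Int
  | 0, path, _ => path
  | fuel+1, path, ci =>
    match PySem.List.pyGet? arr ci with
    | none => path
    | some v =>
      if path.contains v then path
      else pvLoopA n m arr fuel (path ++ [v]) (PySem.Int.mod (ci + m - 1) n)

def circular_path (n : Int) (m : Int) : String :=
  PySem.Str.join ""
    ((pvLoopA n m (PySem.List.pyRange 1 (n+1) 1) (n.toNat + 2) [] 0).map PySem.Int.toStr)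

-- ===== PORT B =====
-- Source B's hand-written Euclidean gcd; the fuel argument (b.toNat + 1 at the call site) only
-- makes the while loop total.
def pvGcdB : Nat → Int → Int → Int
  | 0, a, _ => a
  | fuel+1, a, b => if b = 0 then a else pvGcdB fuel b (PySem.Int.mod a b)

def circular_path_alt (n : Int) (m : Int) : String :=
  let d := PySem.Int.mod (m - 1) n
  let cycleLen := PySem.Int.floordiv n (pvGcdB (d.toNat + 1) n d)
  PySem.Str.join ""
    ((PySem.List.pyRange 0 cycleLen 1).map
      (fun i => PySem.Int.toStr (PySem.Int.mod (i * d) n + 1)))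

-- ===== PRECONDITION & SPEC =====
-- Pre_ excludes exactly n ≤ 0, where A raises IndexError (arr[0] on the empty list).
def Pre_circular_path (n : Int) (m : Int) : Prop := 1 ≤ n
instance (n : Int) (m : Int) : Decidable (Pre_circular_path n m) := by unfold Pre_circular_path; infer_instance
def pvWitness_circular_path : Int × Int := (3, 2)

def Spec_circular_path (n : Int) (m : Int) (out : String) : Prop := out = circular_path_alt n m
instance (n : Int) (m : Int) (out : String) : Decidable (Spec_circular_path n m out) := by unfold Spec_circular_path; infer_instance

-- ===== CLAIM (what is proved, stated in full; the proofs are below) =====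
def Claim_equal_circular_path : Prop := ∀ (n : Int) (m : Int), Dom_circular_path n m → Pre_circular_path n m → Spec_circular_path n m (circular_path n m)

-- ===== LEMMAS AND PROOFS =====

-- the canonical value appended at step k:  k*d % n + 1, in Nat form
def pvVal (N D k : Nat) : Int := ((k * D % N : Nat) : Int) + 1

lemma pvGcdB_eq (f : Nat) : ∀ (a b : Int), 0 ≤ a → 0 ≤ b → b.toNat < f →
    pvGcdB f a b = (Nat.gcd a.toNat b.toNat : Int) := by
  induction f with
  | zero => intro a b _ _ h; omega
  | succ f ih =>
    intro a b ha hb hf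
    by_cases h0 : b = 0
    · subst h0; simp [pvGcdB, Nat.gcd_zero_right, Int.toNat_of_nonneg ha]
    · have hbpos : 0 < b := lt_of_le_of_ne hb (Ne.symm h0)
      have hmod : PySem.Int.mod a b = a % b := PySem.Int.mod_eq_emod_of_pos hbpos
      have h1 : 0 ≤ a % b := Int.emod_nonneg a h0
      have h2 : a % b < b := Int.emod_lt_of_pos a hbpos
      rw [pvGcdB, if_neg h0, hmod, ih b (a % b) hb h1 (by omega)]
      congr 1
      have hm : (a % b).toNat = a.toNat % b.toNat := by
        obtain ⟨A, rfl⟩ := Int.eq_ofNat_of_zero_le ha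
        obtain ⟨B, rfl⟩ := Int.eq_ofNat_of_zero_le hb
        exact_mod_cast rfl
      rw [hm, Nat.gcd_comm b.toNat, ← Nat.gcd_rec, Nat.gcd_comm]

lemma pvCycle (N D : Nat) (_hN : 0 < N) : (N / N.gcd D) * D % N = 0 := by
  have h1 := Nat.gcd_dvd_left N D
  have h2 := Nat.gcd_dvd_right N D
  generalize hg : N.gcd D = g at h1 h2 ⊢
  obtain ⟨c, hc⟩ := h2
  subst hc
  rw [← Nat.mul_assoc, Nat.div_mul_cancel h1, Nat.mul_mod_right]

lemma pvArrGet (n i : Int) (h0 : 0 ≤ i) (h1 : i < n) :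
    PySem.List.pyGet? (PySem.List.pyRange 1 (n+1) 1) i = some (i + 1) := by
  have hlen : (PySem.List.pyRange 1 (n+1) 1).length = (n : Int).toNat := by
    rw [PySem.List.length_pyRange_one]; omega
  rw [PySem.List.pyGet?_eq_some_getElem _ h0 (by rw [hlen]; omega)]
  rw [PySem.List.getElem_pyRange_one]
  congr 1
  omega

lemma pvInj (N D : Nat) (hN : 0 < N) (j k : Nat)
    (hj : j < N / N.gcd D) (hk : k < N / N.gcd D)
    (h : j * D % N = k * D % N) : j = k := by
  have hm : j * D ≡ k * D [MOD N] := h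
  have h2 : j ≡ k [MOD N / N.gcd D] := Nat.ModEq.cancel_right_div_gcd hN hm
  have h3 : j % (N / N.gcd D) = k % (N / N.gcd D) := h2
  rw [Nat.mod_eq_of_lt hj, Nat.mod_eq_of_lt hk] at h3
  exact h3

lemma pvStepNat (N D k : Nat) (hD : D < N) :
    (k * D % N + D) % N = ((k+1) * D) % N := by
  rw [add_one_mul]
  conv_rhs => rw [Nat.add_mod]
  rw [Nat.mod_eq_of_lt hD]

lemma pvStep (n m : Int) (hn : 1 ≤ n) (k : Nat) :
    PySem.Int.mod (((k * (PySem.Int.mod (m-1) n).toNat % n.toNat : Nat) : Int) + m - 1) n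
      = (((k+1) * (PySem.Int.mod (m-1) n).toNat % n.toNat : Nat) : Int) := by
  have hnpos : (0:Int) < n := by omega
  have hd : PySem.Int.mod (m-1) n = (m-1) % n := PySem.Int.mod_eq_emod_of_pos hnpos
  have hd0 : 0 ≤ (m-1) % n := Int.emod_nonneg _ (by omega)
  have hdlt : (m-1) % n < n := Int.emod_lt_of_pos _ hnpos
  have hDlt : ((m-1) % n).toNat < n.toNat := by omega
  have hdc : (m-1) % n = ((((m-1) % n).toNat : Nat) : Int) := by omega
  rw [PySem.Int.mod_eq_emod_of_pos hnpos, hd]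
  generalize hx : k * ((m-1)%n).toNat % n.toNat = x
  have hmE : ((m-1) % n) ≡ (m-1) [ZMOD n] := Int.emod_emod_of_dvd (m-1) dvd_rfl
  have h1 : ((x:Int) + m - 1) % n = ((x:Int) + (m-1) % n) % n := by
    rw [add_sub_assoc]
    exact (Int.ModEq.add_left _ hmE).symm
  rw [h1, hdc]
  have h2 : (((x:Nat) : Int) + ((((m-1) % n).toNat : Nat) : Int)) % n
      = (((x + ((m-1) % n).toNat) % n.toNat : Nat) : Int) := by
    have hN : n = ((n.toNat : Nat) : Int) := by omega
    rw [hN]; exact_mod_cast rfl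
  rw [h2, ← hx, pvStepNat n.toNat _ k hDlt]
  simp

lemma pvLoopA_spec (n m : Int) (hn : 1 ≤ n) (fuel : Nat) :
    ∀ (k : Nat), k ≤ n.toNat / n.toNat.gcd (PySem.Int.mod (m-1) n).toNat →
    n.toNat / n.toNat.gcd (PySem.Int.mod (m-1) n).toNat - k < fuel →
    pvLoopA n m (PySem.List.pyRange 1 (n+1) 1) fuel
      ((List.range k).map (pvVal n.toNat (PySem.Int.mod (m-1) n).toNat))
      ((k * (PySem.Int.mod (m-1) n).toNat % n.toNat : Nat) : Int)
    = (List.range (n.toNat / n.toNat.gcd (PySem.Int.mod (m-1) n).toNat)).map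
        (pvVal n.toNat (PySem.Int.mod (m-1) n).toNat) := by
  have hnpos : (0:Int) < n := by omega
  have hNpos : 0 < n.toNat := by omega
  set N := n.toNat with hNdef
  set D := (PySem.Int.mod (m-1) n).toNat with hDdef
  have hDlt : D < N := by
    have := PySem.Int.mod_lt (m-1) hnpos
    have := PySem.Int.mod_nonneg (m-1) hnpos
    omega
  set L := N / N.gcd D with hLdef
  have hgpos : 0 < N.gcd D := Nat.gcd_pos_of_pos_left D hNpos
  have hLpos : 0 < L := Nat.div_pos (Nat.le_of_dvd hNpos (Nat.gcd_dvd_left N D)) hgpos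
  have hLle : L ≤ N := Nat.div_le_self N _
  induction fuel with
  | zero => intro k _ h; omega
  | succ fuel ih =>
    intro k hk hf
    have hciN : k * D % N < N := Nat.mod_lt _ hNpos
    have hci0 : (0:Int) ≤ ((k * D % N : Nat) : Int) := by positivity
    have hciLt : ((k * D % N : Nat) : Int) < n := by omega
    rw [pvLoopA, pvArrGet n _ hci0 hciLt]
    by_cases hkL : k = L
    · subst hkL
      have hzero : L * D % N = 0 := pvCycle N D hNpos
      have hmem : (((L * D % N : Nat) : Int) + 1) ∈ (List.range L).map (pvVal N D) := by
        rw [hzero]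
        refine List.mem_map.mpr ⟨0, List.mem_range.mpr hLpos, ?_⟩
        simp [pvVal]
      simp only [List.contains_eq_mem, hmem, decide_true, if_true]
    · have hkL' : k < L := lt_of_le_of_ne hk hkL
      have hnmem : (((k * D % N : Nat) : Int) + 1) ∉ (List.range k).map (pvVal N D) := by
        intro hmem
        obtain ⟨j, hj, hje⟩ := List.mem_map.mp hmem
        have hjk : j < k := List.mem_range.mp hj
        have : j * D % N = k * D % N := by
          unfold pvVal at hje
          omega
        have := pvInj N D hNpos j k (by omega) hkL' this
        omega
      simp only [List.contains_eq_mem, hnmem, decide_false]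
      have hpath : (List.range k).map (pvVal N D) ++ [((k * D % N : Nat) : Int) + 1]
          = (List.range (k+1)).map (pvVal N D) := by
        rw [List.range_succ, List.map_append]
        simp [pvVal]
      rw [hpath, pvStep n m hn k, ih (k+1) (by omega) (by omega)]
      simp

lemma pvMain (n m : Int) (hn : 1 ≤ n) : circular_path n m = circular_path_alt n m := by
  have hnpos : (0:Int) < n := by omega
  have hNpos : 0 < n.toNat := by omega
  have hd0 : 0 ≤ PySem.Int.mod (m-1) n := PySem.Int.mod_nonneg _ hnpos
  have hdlt : PySem.Int.mod (m-1) n < n := PySem.Int.mod_lt _ hnpos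
  have hgpos : 0 < n.toNat.gcd (PySem.Int.mod (m-1) n).toNat :=
    Nat.gcd_pos_of_pos_left _ hNpos
  have hLle := Nat.div_le_self n.toNat (n.toNat.gcd (PySem.Int.mod (m-1) n).toNat)
  -- A side
  have hA : circular_path n m
      = PySem.Str.join ""
          (((List.range (n.toNat / n.toNat.gcd (PySem.Int.mod (m-1) n).toNat)).map
              (pvVal n.toNat (PySem.Int.mod (m-1) n).toNat)).map PySem.Int.toStr) := by
    unfold circular_path
    congr 1
    have h0 : ([] : List Int)
        = (List.range 0).map (pvVal n.toNat (PySem.Int.mod (m-1) n).toNat) := by simp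
    have hci : (0 : Int) = ((0 * (PySem.Int.mod (m-1) n).toNat % n.toNat : Nat) : Int) := by simp
    rw [h0]
    conv_lhs => rw [hci]
    rw [pvLoopA_spec n m hn (n.toNat + 2) 0 (Nat.zero_le _) (by omega)]
  -- B side
  have hgcd : pvGcdB ((PySem.Int.mod (m-1) n).toNat + 1) n (PySem.Int.mod (m-1) n)
      = (n.toNat.gcd (PySem.Int.mod (m-1) n).toNat : Int) :=
    pvGcdB_eq _ n _ (by omega) hd0 (by omega)
  have hB : circular_path_alt n m
      = PySem.Str.join ""
          (((List.range (n.toNat / n.toNat.gcd (PySem.Int.mod (m-1) n).toNat)).map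
              (pvVal n.toNat (PySem.Int.mod (m-1) n).toNat)).map PySem.Int.toStr) := by
    unfold circular_path_alt
    simp only
    rw [hgcd]
    have hfd : PySem.Int.floordiv n ((n.toNat.gcd (PySem.Int.mod (m-1) n).toNat : Nat) : Int)
        = ((n.toNat / n.toNat.gcd (PySem.Int.mod (m-1) n).toNat : Nat) : Int) := by
      rw [PySem.Int.floordiv_eq_ediv_of_pos (by exact_mod_cast hgpos)]
      have hN : n = ((n.toNat : Nat) : Int) := by omega
      rw [hN]
      exact_mod_cast rfl
    rw [hfd, PySem.List.pyRange_one]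
    rw [List.map_map, List.map_map]
    have hrange : (((n.toNat / n.toNat.gcd (PySem.Int.mod (m-1) n).toNat : Nat) : Int) - 0).toNat
        = n.toNat / n.toNat.gcd (PySem.Int.mod (m-1) n).toNat := by
      rw [sub_zero, Int.toNat_natCast]
    rw [hrange]
    congr 1
    refine List.map_congr_left (fun j hj => ?_)
    simp only [Function.comp]
    congr 1
    have hdc : PySem.Int.mod (m-1) n = (((PySem.Int.mod (m-1) n).toNat : Nat) : Int) := by omega
    conv_lhs => rw [hdc]
    have hmul : ((0:Int) + (j:Int)) * (((PySem.Int.mod (m-1) n).toNat : Nat) : Int)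
        = (((j * (PySem.Int.mod (m-1) n).toNat : Nat)) : Int) := by push_cast; ring
    rw [hmul, PySem.Int.mod_eq_emod_of_pos hnpos]
    unfold pvVal
    generalize j * (PySem.Int.mod (m-1) n).toNat = X
    have hX : ((X : Nat) : Int) % n = (((X % n.toNat : Nat)) : Int) := by
      conv_lhs => rw [show n = ((n.toNat : Nat) : Int) by omega]
      exact_mod_cast rfl
    rw [hX]
  rw [hA, hB]


-- ===== VERDICT (by name: the statement is the Claim_ definition above) =====
theorem circular_path_spec : Claim_equal_circular_path := by
  intro n m _ hpre
  unfold Spec_circular_path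
  exact pvMain n m hpre
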